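-- pv_equiv track=rewrite | github.com/thomas9911/aoc2020 | day6/main.py | gather_set
-- ===== SOURCE A (Python) =====
-- def gather_set(group):
--     group_set = None
--     for people in group:
--         answers = set(people)
--         if group_set is None:
--             group_set = answers
--             continue
--         group_set = group_set.intersection(answers)
--     return group_set or set()
-- ===== SOURCE B (Python) =====
-- def gather_set(group):
--     counts = {}
--     n = 0
--     for people in group:
--         n += 1
--         for c in set(people):
--             counts[c] = counts.get(c, 0) + 1
--     return {c for c, v in counts.items() if v == n}
-- ===== Notes on version B (the rewrite author's own statement) =====
-- stated objective: alternative
-- what changed: Replaces the progressive set-intersection accumulator with a single counting pass (a frequency table over per-member deduplicated answers plus a member count) followed by a filter keeping the characters seen in every member.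
import Mathlib
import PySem

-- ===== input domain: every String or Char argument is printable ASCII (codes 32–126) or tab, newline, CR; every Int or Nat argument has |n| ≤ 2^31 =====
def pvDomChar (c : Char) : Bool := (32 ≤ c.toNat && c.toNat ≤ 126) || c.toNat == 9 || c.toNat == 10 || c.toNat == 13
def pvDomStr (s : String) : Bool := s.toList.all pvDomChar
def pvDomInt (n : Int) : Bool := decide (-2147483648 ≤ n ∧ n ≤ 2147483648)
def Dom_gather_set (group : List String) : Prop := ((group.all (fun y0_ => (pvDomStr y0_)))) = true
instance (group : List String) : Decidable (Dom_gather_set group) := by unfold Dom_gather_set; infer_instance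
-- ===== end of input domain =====

-- B replaces A's progressive set-intersection accumulator by one counting pass (per-member
-- deduplicated frequency table + member count) and a final filter; same cost, different structure.

-- ===== PORT A =====
-- A: group_set = None; for people in group: intersect with set(people); return group_set or set().
-- ('or set()' fires when group_set is None or the empty set; both give the empty list here.)
def gather_set (group : List String) : List String :=
  let gs : Option (PySem.Set Char) := group.foldl
    (fun acc people =>
      let answers := PySem.Set.ofList people.toList
      match acc with
      | none => some answers
      | some s => some (PySem.Set.inter s answers)) none
  match gs with
  | none => []
  | some s => s.map (fun c => String.singleton c)

-- ===== PORT B =====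
-- B: counts = {}; n = 0; for people: n += 1; for c in set(people): counts[c] = counts.get(c,0)+1;
--    return {c for c, v in counts.items() if v == n}.
def gather_set_alt (group : List String) : List String :=
  let st : Int × PySem.Dict Char Int := group.foldl
    (fun st people =>
      (st.1 + 1,
       (PySem.Set.ofList people.toList).foldl (fun d c => d.insert c (d.getD c 0 + 1)) st.2))
    (0, PySem.Dict.empty)
  (st.2.items.filter (fun kv => kv.2 == st.1)).map (fun kv => String.singleton kv.1)

-- ===== PRECONDITION & SPEC =====
def Spec_gather_set (group : List String) (out : List String) : Prop := out = gather_set_alt group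
instance (group : List String) (out : List String) : Decidable (Spec_gather_set group out) := by unfold Spec_gather_set; infer_instance

-- ===== CLAIM (what is proved, stated in full; the proofs are below) =====
def Claim_equal_gather_set : Prop := ∀ (group : List String), Dom_gather_set group → Spec_gather_set group (gather_set group)

-- ===== LEMMAS AND PROOFS =====

-- A's loop once the accumulator is 'some s' stays 'some' and just intersects.
theorem gather_foldl_some (rest : List String) (s : PySem.Set Char) :
    rest.foldl
      (fun acc people =>
        let answers := PySem.Set.ofList people.toList
        match acc with
        | none => some answers
        | some s => some (PySem.Set.inter s answers)) (some s)
    = some (rest.foldl (fun s q => PySem.Set.inter s (PySem.Set.ofList q.toList)) s) := by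
  induction rest generalizing s with
  | nil => rfl
  | cons q rest ih => simp [List.foldl_cons, ih]

-- Iterated intersection is one filter by membership in every later member.
theorem foldl_inter_eq_filter (rest : List String) (s : PySem.Set Char) :
    rest.foldl (fun s q => PySem.Set.inter s (PySem.Set.ofList q.toList)) s
    = s.filter (fun c => rest.all (fun q => (PySem.Set.ofList q.toList).contains c)) := by
  induction rest generalizing s with
  | nil => simp
  | cons q rest ih =>
      rw [List.foldl_cons, ih]
      simp only [PySem.Set.inter, List.filter_filter, List.all_cons]
      exact List.filter_congr (fun x _ => by rw [Bool.and_comm])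

-- Set.update appends fresh elements on the right.
theorem update_fresh (l : List Char) : ∀ (s : PySem.Set Char), l.Nodup → (∀ x ∈ l, x ∉ s) →
    PySem.Set.update s l = s ++ l := by
  induction l with
  | nil => intro s _ _; simp [PySem.Set.update]
  | cons x l ih =>
      intro s hnd hfr
      have hx : x ∉ s := hfr x (by simp)
      have hadd : PySem.Set.add s x = s ++ [x] := by
        simp [PySem.Set.add, PySem.Set.contains, hx]
      have hstep : PySem.Set.update s (x :: l) = PySem.Set.update (s ++ [x]) l := by
        simp [PySem.Set.update, hadd]
      rw [hstep, ih (s ++ [x]) hnd.of_cons]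
      · simp
      · intro y hy
        simp only [List.mem_append, List.mem_singleton]
        rintro (h | rfl)
        · exact hfr y (by simp [hy]) h
        · exact (List.nodup_cons.mp hnd).1 hy

-- Membership survives Set.update.
theorem mem_update_of_mem (l : List Char) : ∀ (s : PySem.Set Char) (x : Char), x ∈ s →
    x ∈ PySem.Set.update s l := by
  induction l with
  | nil => intro s x hx; exact hx
  | cons y l ih =>
      intro s x hx
      exact ih _ _ ((PySem.Set.mem_add s y x).mpr (Or.inl hx))

-- Adding an element a predicate rejects (unless already present) does not change the filter.
theorem filter_add (P : Char → Bool) (s : PySem.Set Char) (y : Char)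
    (h : P y = true → y ∈ s) : (PySem.Set.add s y).filter P = s.filter P := by
  by_cases hc : y ∈ s
  · simp [PySem.Set.add, PySem.Set.contains, hc]
  · have hy : P y = false := by
      by_contra hne
      exact hc (h (by simpa using hne))
    simp [PySem.Set.add, PySem.Set.contains, hc, hy]

-- Filtering by a predicate that only holds inside s ignores everything an update appends.
theorem filter_update (P : Char → Bool) (l : List Char) : ∀ (s : PySem.Set Char),
    (∀ x, P x = true → x ∈ s) → (PySem.Set.update s l).filter P = s.filter P := by
  induction l with
  | nil => intro s _; rfl
  | cons y l ih =>
      intro s hP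
      have hPs : ∀ x, P x = true → x ∈ PySem.Set.add s y := by
        intro x hx
        exact (PySem.Set.mem_add s y x).mpr (Or.inl (hP x hx))
      have h1 : PySem.Set.update s (y :: l) = PySem.Set.update (PySem.Set.add s y) l := by
        simp [PySem.Set.update]
      rw [h1, ih _ hPs, filter_add P s y (hP y)]

-- Filtering by such a predicate also ignores everything B's key-union loop appends.
theorem filter_foldl_update (P : Char → Bool) (rest : List String) :
    ∀ (s : PySem.Set Char), (∀ x, P x = true → x ∈ s) →
    (rest.foldl (fun ks q => PySem.Set.update ks (PySem.Set.ofList q.toList)) s).filter P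
      = s.filter P := by
  induction rest with
  | nil => intro s _; rfl
  | cons q rest ih =>
      intro s hP
      rw [List.foldl_cons,
        ih _ (fun x hx => mem_update_of_mem _ _ _ (hP x hx)),
        filter_update P _ _ hP]

-- The dict half of B's loop: keys and counts after folding a whole group, from any start.
theorem dict_fold_spec (group : List String) :
    ∀ (d : PySem.Dict Char Int),
      (group.foldl
        (fun d people =>
          (PySem.Set.ofList people.toList).foldl (fun d c => d.insert c (d.getD c 0 + 1)) d)
        d).keys
        = group.foldl (fun ks q => PySem.Set.update ks (PySem.Set.ofList q.toList)) d.keys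
      ∧ (d.keys.Nodup →
        (group.foldl
          (fun d people =>
            (PySem.Set.ofList people.toList).foldl (fun d c => d.insert c (d.getD c 0 + 1)) d)
          d).keys.Nodup)
      ∧ ∀ c, (group.foldl
          (fun d people =>
            (PySem.Set.ofList people.toList).foldl (fun d c => d.insert c (d.getD c 0 + 1)) d)
          d).getD c 0
          = d.getD c 0
            + (group.countP (fun q => (PySem.Set.ofList q.toList).contains c) : Int) := by
  induction group with
  | nil => intro d; refine ⟨rfl, fun h => h, fun c => by simp⟩
  | cons p rest ih =>
      intro d
      set d' := (PySem.Set.ofList p.toList).foldl (fun d c => d.insert c (d.getD c 0 + 1)) d with hd'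
      have hkeys' : d'.keys = PySem.Set.update d.keys (PySem.Set.ofList p.toList) :=
        PySem.Dict.keys_foldl_insert _ _ _
      obtain ⟨hk, hn, hg⟩ := ih d'
      refine ⟨?_, ?_, ?_⟩
      · rw [List.foldl_cons, ← hd', hk, hkeys']
        rw [List.foldl_cons]
      · intro hnd
        exact hn (by rw [hd']; exact PySem.Dict.nodup_keys_foldl_insert _ _ _ hnd)
      · intro c
        have hgd : d'.getD c 0 = d.getD c 0 + ((PySem.Set.ofList p.toList).count c : Int) := by
          rw [hd']; exact PySem.Dict.getD_foldl_insert_add_one _ _ _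
        have hcnt : ((PySem.Set.ofList p.toList).count c : Int)
            = (if (PySem.Set.ofList p.toList).contains c then 1 else 0) := by
          have hnd := PySem.Set.nodup_ofList (xs := p.toList)
          by_cases h : c ∈ (PySem.Set.ofList p.toList : List Char)
          · have h1 : (PySem.Set.ofList p.toList).count c = 1 :=
              le_antisymm (List.nodup_iff_count_le_one.mp hnd c) (List.one_le_count_iff.mpr h)
            rw [h1]
            simp [PySem.Set.contains, h]
          · simp [List.count_eq_zero_of_not_mem h, PySem.Set.contains, h]
        rw [List.foldl_cons, ← hd', hg c, hgd, List.countP_cons, hcnt]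
        by_cases h : (PySem.Set.ofList p.toList).contains c = true
        · rw [if_pos h, if_pos h]
          push_cast
          ring
        · rw [if_neg h, if_neg h]
          push_cast
          ring

-- The counter half of B's loop: n counts the members.
theorem count_fold (group : List String) :
    group.foldl (fun (n : Int) (_ : String) => n + 1) 0 = (group.length : Int) := by
  have := PySem.List.foldl_add (l := group) (g := fun (_ : String) => (1 : Int)) (a := 0)
  simpa [PySem.List.sum_map_const_int] using this

-- ===== VERDICT (by name: the statement is the Claim_ definition above) =====
theorem gather_set_spec : Claim_equal_gather_set := by
  intro group _
  show gather_set group = gather_set_alt group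
  cases group with
  | nil => rfl
  | cons p rest =>
      have hA : gather_set (p :: rest)
          = ((PySem.Set.ofList p.toList).filter
              (fun c => rest.all (fun q => (PySem.Set.ofList q.toList).contains c))).map
              (fun c => String.singleton c) := by
        simp only [gather_set, List.foldl_cons, gather_foldl_some, foldl_inter_eq_filter]
      have hsplit := PySem.List.foldl_prod_mk
        (f := fun (n : Int) (_ : String) => n + 1)
        (g := fun (d : PySem.Dict Char Int) (people : String) =>
          (PySem.Set.ofList people.toList).foldl (fun d c => d.insert c (d.getD c 0 + 1)) d)
        (l := p :: rest) (a := (0 : Int)) (b := PySem.Dict.empty)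
      obtain ⟨hk, hn, hg⟩ := dict_fold_spec (p :: rest) PySem.Dict.empty
      have hnd := hn (by simp)
      have hitems := PySem.Dict.items_eq_map_keys _ hnd (0 : Int)
      rw [hA]
      show _ = ((((p :: rest).foldl _ ((0 : Int), PySem.Dict.empty)).2.items.filter _).map _)
      rw [hsplit]
      simp only [count_fold]
      rw [hitems, List.filter_map, List.map_map]
      simp only [Function.comp_def]
      have hupd0 : PySem.Set.update ([] : PySem.Set Char) (PySem.Set.ofList p.toList)
          = PySem.Set.ofList p.toList := by
        rw [update_fresh _ _ (PySem.Set.nodup_ofList _) (by simp)]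
        simp
      have hfold1 : (p :: rest).foldl
            (fun ks q => PySem.Set.update ks (PySem.Set.ofList q.toList)) ([] : PySem.Set Char)
          = rest.foldl
            (fun ks q => PySem.Set.update ks (PySem.Set.ofList q.toList))
            (PySem.Set.ofList p.toList) := by
        rw [List.foldl_cons, hupd0]
      rw [hk]
      simp only [PySem.Dict.keys_empty]
      rw [hfold1]
      set D := ((p :: rest).foldl
          (fun (d : PySem.Dict Char Int) people =>
            (PySem.Set.ofList people.toList).foldl (fun d c => d.insert c (d.getD c 0 + 1)) d)
          PySem.Dict.empty) with hD
      set P : Char → Bool :=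
        fun k => (fun kv : Char × Int => kv.2 == ((p :: rest).length : Int)) (k, D.getD k 0)
        with hP
      have hgetD : ∀ c, D.getD c 0
          = ((p :: rest).countP (fun q => (PySem.Set.ofList q.toList).contains c) : Int) := by
        intro c
        simpa using hg c
      have hPmem : ∀ x, P x = true → x ∈ (PySem.Set.ofList p.toList : List Char) := by
        intro x hx
        rw [hP] at hx
        simp only [beq_iff_eq, hgetD x, Nat.cast_inj] at hx
        have hall := List.countP_eq_length.mp hx
        have hmem := hall p (by simp)
        simpa [PySem.Set.contains] using hmem
      rw [filter_foldl_update P rest _ hPmem]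
      refine congrArg (List.map _) (List.filter_congr ?_)
      intro x hxmem
      have hx1 : (PySem.Set.ofList p.toList).contains x = true := by
        simpa [PySem.Set.contains] using hxmem
      rw [hP, Bool.eq_iff_iff]
      simp only [List.all_eq_true, beq_iff_eq, hgetD x, List.countP_cons, hx1, if_pos,
        List.length_cons]
      constructor
      · intro hall
        have h1 : rest.countP (fun q => (PySem.Set.ofList q.toList).contains x) = rest.length :=
          List.countP_eq_length.mpr hall
        rw [h1]
      · intro h
        have h1 : rest.countP (fun q => (PySem.Set.ofList q.toList).contains x) + 1
            = rest.length + 1 := by exact_mod_cast h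
        exact List.countP_eq_length.mp (by omega)
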